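-- pv_equiv track=rewrite | github.com/eliottcassidy2000/math | 04-computation/beta2_boundary_structure.py | all_tournaments
-- ===== SOURCE A (Python) =====
-- def all_tournaments(n):
--     pairs = [(i,j) for i in range(n) for j in range(i+1,n)]
--     m = len(pairs)
--     for mask in range(1 << m):
--         A = [[0]*n for _ in range(n)]
--         for idx, (i,j) in enumerate(pairs):
--             if (mask >> idx) & 1: A[i][j] = 1
--             else: A[j][i] = 1
--         yield A
--
-- n = 6
-- ===== SOURCE B (Python) =====
-- def all_tournaments(n):
--     # Alternative: breadth-first product construction over the pairs (processed
--     # last-pair-first so the first pair varies fastest), no masks or bit ops.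
--     pairs = [(i, j) for i in range(n) for j in range(i + 1, n)]
--     acc = [[[0] * n for _ in range(n)]]
--     for (i, j) in reversed(pairs):
--         nxt = []
--         for A in acc:
--             B0 = [row[:] for row in A]
--             B0[j][i] = 1
--             B1 = [row[:] for row in A]
--             B1[i][j] = 1
--             nxt.append(B0)
--             nxt.append(B1)
--         acc = nxt
--     for A in acc:
--         yield A
-- ===== Notes on version B (the rewrite author's own statement) =====
-- stated objective: alternative
-- what changed: Replaces A's bitmask enumeration (one counter over range(1<<m), rebuilding each matrix from a zero matrix by testing mask bits) with a breadth-first product construction: the list of partial matrices is doubled once per pair, processed last-pair-first so the first pair varies fastest, with no masks or bit operations.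
import Mathlib
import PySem

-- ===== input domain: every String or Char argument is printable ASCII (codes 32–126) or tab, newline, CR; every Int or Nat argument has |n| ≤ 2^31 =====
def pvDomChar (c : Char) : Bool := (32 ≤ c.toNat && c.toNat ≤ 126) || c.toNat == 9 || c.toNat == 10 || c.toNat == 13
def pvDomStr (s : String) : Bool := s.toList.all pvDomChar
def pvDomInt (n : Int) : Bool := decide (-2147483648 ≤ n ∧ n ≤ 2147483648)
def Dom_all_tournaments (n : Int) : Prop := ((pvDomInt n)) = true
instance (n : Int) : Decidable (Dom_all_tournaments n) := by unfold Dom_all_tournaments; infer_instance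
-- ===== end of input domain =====

-- B replaces A's per-mask rebuild (one matrix per bitmask) by a breadth-first
-- product construction over the pairs, processed last-pair-first; same values
-- in the same order, no masks or bit operations (objective: alternative).
-- A and B are generators; equivalence is about the list of yielded matrices.

-- ===== PORT A =====
-- pairs = [(i,j) for i in range(n) for j in range(i+1,n)]   (B computes the same list)
def pvPairs (n : Int) : List (Int × Int) :=
  (PySem.List.pyRange 0 n 1).flatMap (fun i =>
    (PySem.List.pyRange (i + 1) n 1).map (fun j => (i, j)))

-- A = [[0]*n for _ in range(n)]   (B builds the same zero matrix)
def pvZeros (n : Int) : List (List Int) :=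
  (PySem.List.pyRange 0 n 1).map (fun _ => List.replicate n.toNat (0 : Int))

-- A[i][j] = 1; i, j always come from range(n), hence are nonnegative and in
-- range, so the .toNat conversion is exact.
def pvSetCell (A : List (List Int)) (i j : Int) : List (List Int) :=
  A.modify i.toNat (fun row => row.set j.toNat 1)

-- body of A's inner loop: if (mask >> idx) & 1: A[i][j] = 1 else: A[j][i] = 1
-- (idx comes from enumerate, hence is nonnegative: .toNat is exact)
def pvStepA (mask : Int) (A : List (List Int)) (e : Int × (Int × Int)) : List (List Int) :=
  if PySem.Int.band (mask >>> e.1.toNat) 1 == 1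
  then pvSetCell A e.2.1 e.2.2
  else pvSetCell A e.2.2 e.2.1

def all_tournaments (n : Int) : List (List (List Int)) :=
  let pairs := pvPairs n
  let m := pairs.length
  (PySem.List.pyRange 0 ((1 : Int) <<< m) 1).map (fun mask =>
    (PySem.List.enumerate pairs 0).foldl (pvStepA mask) (pvZeros n))

-- ===== PORT B =====
-- body of B's loop over reversed(pairs): each accumulated matrix A spawns the
-- two orientations of the current pair, '0' (A[j][i]=1) before '1' (A[i][j]=1).
def pvStepB (acc : List (List (List Int))) (p : Int × Int) : List (List (List Int)) :=
  acc.flatMap (fun A => [pvSetCell A p.2 p.1, pvSetCell A p.1 p.2])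

def all_tournaments_alt (n : Int) : List (List (List Int)) :=
  (pvPairs n).reverse.foldl pvStepB [pvZeros n]

-- ===== PRECONDITION & SPEC =====
def Spec_all_tournaments (n : Int) (out : List (List (List Int))) : Prop := out = all_tournaments_alt n
instance (n : Int) (out : List (List (List Int))) : Decidable (Spec_all_tournaments n out) := by unfold Spec_all_tournaments; infer_instance

-- ===== CLAIM (what is proved, stated in full; the proofs are below) =====
def Claim_equal_all_tournaments : Prop := ∀ (n : Int), Dom_all_tournaments n → Spec_all_tournaments n (all_tournaments n)

-- ===== LEMMAS AND PROOFS =====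

-- A's inner fold, with the enumeration index starting at s
def pvApply (ps : List (Int × Int)) (s mask : Int) (A : List (List Int)) : List (List Int) :=
  (PySem.List.enumerate ps s).foldl (pvStepA mask) A

-- the property of the pair list that the induction maintains
def pvSane (ps : List (Int × Int)) : Prop :=
  (∀ p ∈ ps, 0 ≤ p.1 ∧ p.1 < p.2) ∧ ps.Pairwise (· ≠ ·)

lemma pvStepB_append (L1 L2 : List (List (List Int))) (p : Int × Int) :
    pvStepB (L1 ++ L2) p = pvStepB L1 p ++ pvStepB L2 p := by
  simp [pvStepB]

lemma foldl_stepB_append (ps : List (Int × Int)) (L1 L2 : List (List (List Int))) :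
    ps.foldl pvStepB (L1 ++ L2) = ps.foldl pvStepB L1 ++ ps.foldl pvStepB L2 := by
  induction ps generalizing L1 L2 with
  | nil => rfl
  | cons p ps ih => simp [List.foldl_cons, pvStepB_append, ih]

lemma setCell_comm (A : List (List Int)) (i j a b : Int)
    (h : (i.toNat, j.toNat) ≠ (a.toNat, b.toNat)) :
    pvSetCell (pvSetCell A i j) a b = pvSetCell (pvSetCell A a b) i j := by
  unfold pvSetCell
  apply List.ext_getElem (by simp)
  intro r h1 h2
  simp only [List.getElem_modify]
  by_cases hia : i.toNat = a.toNat
  · have hjb : j.toNat ≠ b.toNat := by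
      intro hh; exact h (by rw [hia, hh])
    split_ifs with h1' h2' <;> try rfl
    exact List.set_comm _ _ hjb
  · split_ifs with h1' h2' <;> first
      | rfl
      | (exact absurd (h2'.trans h1'.symm) hia)

lemma pvApply_setCell_comm (q : List (Int × Int)) (s mask : Int) (A : List (List Int))
    (i j : Int)
    (hq : ∀ p ∈ q, (p.1.toNat, p.2.toNat) ≠ (i.toNat, j.toNat) ∧
                   (p.2.toNat, p.1.toNat) ≠ (i.toNat, j.toNat)) :
    pvApply q s mask (pvSetCell A i j) = pvSetCell (pvApply q s mask A) i j := by
  induction q generalizing s A with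
  | nil => rfl
  | cons p q ih =>
    have hp := hq p (by simp)
    have hq' : ∀ p' ∈ q, (p'.1.toNat, p'.2.toNat) ≠ (i.toNat, j.toNat) ∧
        (p'.2.toNat, p'.1.toNat) ≠ (i.toNat, j.toNat) := fun p' hm => hq p' (by simp [hm])
    simp only [pvApply, PySem.List.enumerate_cons, List.foldl_cons] at *
    rw [show pvStepA mask (pvSetCell A i j) (s, p)
          = pvSetCell (pvStepA mask A (s, p)) i j from ?_]
    · exact ih (s+1) _ hq'
    · unfold pvStepA
      split_ifs
      · exact setCell_comm _ _ _ _ _ hp.1.symm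
      · exact setCell_comm _ _ _ _ _ hp.2.symm

lemma pvApply_congr (q : List (Int × Int)) (s m1 m2 : Int) (A : List (List Int))
    (h : ∀ t : Nat, (t : Int) < q.length →
        PySem.Int.band (m1 >>> (s + t).toNat) 1 = PySem.Int.band (m2 >>> (s + t).toNat) 1) :
    pvApply q s m1 A = pvApply q s m2 A := by
  induction q generalizing s A with
  | nil => rfl
  | cons p q ih =>
    simp only [pvApply, PySem.List.enumerate_cons, List.foldl_cons]
    have h0 := h 0 (by simp)
    simp only [Nat.cast_zero, add_zero] at h0
    rw [show pvStepA m1 A (s, p) = pvStepA m2 A (s, p) from by unfold pvStepA; rw [h0]]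
    exact ih (s+1) _ (fun t ht => by
      have := h (t+1) (by push_cast; simp only [List.length_cons] at ht ⊢; push_cast at ht ⊢; omega)
      simpa [add_assoc, add_comm, add_left_comm] using this)

lemma pvApply_snoc (q : List (Int × Int)) (l : Int × Int) (s mask : Int) (A : List (List Int)) :
    pvApply (q ++ [l]) s mask A = pvStepA mask (pvApply q s mask A) (s + q.length, l) := by
  simp [pvApply, PySem.List.enumerate_append, PySem.List.enumerate]

lemma band_natCast_shift (k t : Nat) :
    PySem.Int.band (((k : Nat) : Int) >>> t) 1 = (((k >>> t) &&& 1 : Nat) : Int) := by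
  rw [← Int.natCast_shiftRight]
  exact_mod_cast PySem.Int.band_natCast (k >>> t) 1

lemma bit_low (k m : Nat) (hk : k < 2 ^ m) :
    PySem.Int.band (((k : Nat) : Int) >>> m) 1 = 0 := by
  rw [band_natCast_shift]
  have : k >>> m = 0 := by rw [Nat.shiftRight_eq_div_pow]; exact Nat.div_eq_of_lt hk
  simp [this]

lemma bit_high (k m : Nat) (hk : k < 2 ^ m) :
    PySem.Int.band (((2 ^ m + k : Nat) : Int) >>> m) 1 = 1 := by
  rw [band_natCast_shift]
  have : (2 ^ m + k) >>> m = 1 := by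
    rw [Nat.shiftRight_eq_div_pow]
    have h2 : 0 < 2 ^ m := Nat.two_pow_pos m
    rw [show 2 ^ m + k = k + 1 * 2 ^ m by ring, Nat.add_mul_div_right _ _ h2,
        Nat.div_eq_of_lt hk]
  simp [this]

lemma bit_lower_eq (k m t : Nat) (ht : t < m) :
    PySem.Int.band (((2 ^ m + k : Nat) : Int) >>> t) 1 =
      PySem.Int.band (((k : Nat) : Int) >>> t) 1 := by
  rw [band_natCast_shift, band_natCast_shift]
  have hsplit : 2 ^ m + k = 2 ^ (m - t) * 2 ^ t + k := by
    rw [← Nat.pow_add, Nat.sub_add_cancel (le_of_lt ht)]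
  rw [hsplit]
  rw [Nat.shiftRight_eq_div_pow, Nat.shiftRight_eq_div_pow]
  have h2 : 0 < 2 ^ t := Nat.two_pow_pos t
  rw [show 2 ^ (m - t) * 2 ^ t + k = k + 2 ^ (m - t) * 2 ^ t by ring,
      Nat.add_mul_div_right _ _ h2]
  rw [Nat.and_one_is_mod, Nat.and_one_is_mod]
  have heven : 2 ^ (m - t) % 2 = 0 := by
    have : 2 ∣ 2 ^ (m - t) := dvd_pow_self 2 (by omega)
    omega
  omega

lemma pv_main (ps : List (Int × Int)) (hs : pvSane ps) (A0 : List (List Int)) :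
    ps.reverse.foldl pvStepB [A0] =
      (List.range (2 ^ ps.length)).map (fun k : Nat => pvApply ps 0 (k : Int) A0) := by
  induction ps using List.reverseRecOn generalizing A0 with
  | nil => simp [pvApply, PySem.List.enumerate]
  | append_singleton q l ih =>
    have hsq : pvSane q := by
      refine ⟨fun p hp => hs.1 p (List.mem_append_left _ hp), (List.pairwise_append.mp hs.2).1⟩
    have hql : ∀ p ∈ q, p ≠ l := fun p hp =>
      (List.pairwise_append.mp hs.2).2.2 p hp l (by simp)
    have hbl : 0 ≤ l.1 ∧ l.1 < l.2 := hs.1 l (by simp)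
    have hbq : ∀ p ∈ q, 0 ≤ p.1 ∧ p.1 < p.2 := fun p hp => hs.1 p (List.mem_append_left _ hp)
    have hne' : ∀ p ∈ q, p.1 ≠ l.1 ∨ p.2 ≠ l.2 := by
      intro p hp
      by_contra hcon; push Not at hcon
      exact hql p hp (Prod.ext hcon.1 hcon.2)
    have hc1 : ∀ p ∈ q, (p.1.toNat, p.2.toNat) ≠ (l.2.toNat, l.1.toNat) ∧
        (p.2.toNat, p.1.toNat) ≠ (l.2.toNat, l.1.toNat) := by
      intro p hp
      obtain ⟨b1, b2⟩ := hbq p hp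
      obtain ⟨c1, c2⟩ := hbl
      rcases hne' p hp with h | h <;>
        constructor <;> (intro hh; simp only [Prod.mk.injEq] at hh; omega)
    have hc2 : ∀ p ∈ q, (p.1.toNat, p.2.toNat) ≠ (l.1.toNat, l.2.toNat) ∧
        (p.2.toNat, p.1.toNat) ≠ (l.1.toNat, l.2.toNat) := by
      intro p hp
      obtain ⟨b1, b2⟩ := hbq p hp
      obtain ⟨c1, c2⟩ := hbl
      rcases hne' p hp with h | h <;>
        constructor <;> (intro hh; simp only [Prod.mk.injEq] at hh; omega)
    rw [List.reverse_append, List.reverse_singleton, List.singleton_append,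
        List.foldl_cons]
    have hstep : pvStepB [A0] l = [pvSetCell A0 l.2 l.1] ++ [pvSetCell A0 l.1 l.2] := by
      simp [pvStepB]
    rw [hstep, foldl_stepB_append, ih hsq, ih hsq]
    rw [List.length_append, List.length_singleton,
        show 2 ^ (q.length + 1) = 2 ^ q.length + 2 ^ q.length by ring,
        List.range_add, List.map_append, List.map_map]
    congr 1
    · refine List.map_congr_left ?_
      intro k hk
      have hk' : k < 2 ^ q.length := List.mem_range.mp hk
      rw [pvApply_snoc]
      unfold pvStepA
      simp only [zero_add, Int.toNat_natCast]
      rw [bit_low k q.length hk']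
      simp only [show ((0 : Int) == 1) = false from rfl, Bool.false_eq_true, if_false]
      exact pvApply_setCell_comm q 0 _ A0 l.2 l.1 hc1
    · refine List.map_congr_left ?_
      intro k hk
      have hk' : k < 2 ^ q.length := List.mem_range.mp hk
      have hcond : ∀ t : Nat, (t : Int) < q.length →
          PySem.Int.band (((2 ^ q.length + k : Nat) : Int) >>> ((0 : Int) + t).toNat) 1 =
          PySem.Int.band (((k : Nat) : Int) >>> ((0 : Int) + t).toNat) 1 := by
        intro t ht
        have ht' : t < q.length := by exact_mod_cast ht
        simpa using bit_lower_eq k q.length t ht'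
      simp only [Function.comp]
      rw [pvApply_snoc]
      unfold pvStepA
      simp only [zero_add, Int.toNat_natCast]
      rw [bit_high k q.length hk']
      simp only [show ((1 : Int) == 1) = true from rfl, if_true]
      rw [pvApply_congr q 0 _ ((k : Nat) : Int) A0 hcond]
      exact pvApply_setCell_comm q 0 _ A0 l.1 l.2 hc2

lemma pvSane_pairs (n : Int) : pvSane (pvPairs n) := by
  constructor
  · intro p hp
    simp only [pvPairs, List.mem_flatMap, List.mem_map, PySem.List.mem_pyRange_one] at hp
    obtain ⟨i, hi, j, hj, rfl⟩ := hp
    exact ⟨hi.1, by omega⟩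
  · have hnd : (pvPairs n).Nodup := by
      rw [pvPairs, List.nodup_flatMap]
      constructor
      · intro i _
        exact (PySem.List.nodup_pyRange_one _ _).map (fun a b h => by
          simpa using congrArg Prod.snd h)
      · have := PySem.List.nodup_pyRange_one 0 n
        refine this.imp ?_
        intro a b hab p hpa hpb
        simp only [List.mem_map] at hpa hpb
        obtain ⟨j1, _, rfl⟩ := hpa
        obtain ⟨j2, _, h2⟩ := hpb
        exact hab (by simpa using congrArg Prod.fst h2.symm)
    exact hnd

-- ===== VERDICT (by name: the statement is the Claim_ definition above) =====
theorem all_tournaments_spec : Claim_equal_all_tournaments := by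
  intro n _h
  simp only [Spec_all_tournaments, all_tournaments, all_tournaments_alt]
  rw [pv_main (pvPairs n) (pvSane_pairs n) (pvZeros n)]
  rw [PySem.List.pyRange_one, List.map_map]
  have h1 : (((1 : Int) <<< (pvPairs n).length) - 0).toNat = 2 ^ (pvPairs n).length := by
    rw [Int.shiftLeft_eq, one_mul, sub_zero,
        show ((2 : Int) ^ (pvPairs n).length) = ((2 ^ (pvPairs n).length : Nat) : Int) by push_cast; ring,
        Int.toNat_natCast]
  rw [h1]
  refine List.map_congr_left ?_
  intro k _
  simp [pvApply]
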